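-- pv_equiv track=rewrite | github.com/joeyemerson/Codewars | python/7kyu_SillyCASE.py | sillycase
-- ===== SOURCE A (Python) =====
-- from math import ceil
--
-- def sillycase(string):
--     result = ""
--     midpoint = ceil(len(string) / 2)
--     for i in range(len(string)):
--         if i < midpoint:
--             result += string[i].lower()
--         else:
--             result += string[i].upper()
--     return result
-- ===== SOURCE B (Python) =====
-- def sillycase(string):
--     mid = (len(string) + 1) // 2  # same midpoint as ceil(len/2)
--     return string[:mid].lower() + string[mid:].upper()
-- ===== Notes on version B (the rewrite author's own statement) =====
-- stated objective: simpler
-- what changed: Replaces the index-by-index loop with a per-character case branch and repeated string concatenation by one split at the midpoint and two bulk slice .lower()/.upper() calls.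
import Mathlib
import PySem

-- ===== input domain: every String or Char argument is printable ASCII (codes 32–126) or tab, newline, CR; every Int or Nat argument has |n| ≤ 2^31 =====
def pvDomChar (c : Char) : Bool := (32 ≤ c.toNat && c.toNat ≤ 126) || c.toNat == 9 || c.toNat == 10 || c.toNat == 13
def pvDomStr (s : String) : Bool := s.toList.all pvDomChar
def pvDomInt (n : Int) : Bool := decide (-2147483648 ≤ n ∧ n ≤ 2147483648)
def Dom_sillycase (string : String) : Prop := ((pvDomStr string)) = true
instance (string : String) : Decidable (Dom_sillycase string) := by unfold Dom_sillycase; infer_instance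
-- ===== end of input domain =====

-- B lowercases the first half and uppercases the second half with one split and two bulk
-- case conversions instead of A's per-index loop with a per-character branch (objective: simpler).

-- ===== PORT A =====
-- A: result = ""; midpoint = ceil(len/2); for i in range(len): append string[i].lower()/upper().
-- midpoint: math.ceil(n/2) on a Nat length n is (n+1)/2 (exact for these sizes).
def sillycase (string : String) : String :=
  let s := string.toList
  let midpoint := (s.length + 1) / 2
  String.ofList ((List.range s.length).foldl
    (fun result i =>
      result ++ [if i < midpoint then PySem.Chars.lowerChar (s.getD i ' ')
                 else PySem.Chars.upperChar (s.getD i ' ')]) [])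

-- ===== PORT B =====
-- B: mid = (len+1)//2; string[:mid].lower() + string[mid:].upper()
def sillycase_alt (string : String) : String :=
  let mid : Int := PySem.Int.floordiv ((PySem.Str.len string : Int) + 1) 2
  PySem.Str.lower (PySem.Str.slice string none (some mid))
    ++ PySem.Str.upper (PySem.Str.slice string (some mid) none)

-- ===== PRECONDITION & SPEC =====
def Spec_sillycase (string : String) (out : String) : Prop := out = sillycase_alt string
instance (string : String) (out : String) : Decidable (Spec_sillycase string out) := by unfold Spec_sillycase; infer_instance

-- ===== CLAIM (what is proved, stated in full; the proofs are below) =====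
def Claim_equal_sillycase : Prop := ∀ (string : String), Dom_sillycase string → Spec_sillycase string (sillycase string)

-- ===== LEMMAS AND PROOFS =====

theorem sillycase_lists (l : List Char) (m : Nat) (hm : m ≤ l.length) :
    (List.range l.length).map
      (fun i => if i < m then PySem.Chars.lowerChar (l.getD i ' ')
                else PySem.Chars.upperChar (l.getD i ' '))
      = (l.take m).map PySem.Chars.lowerChar ++ (l.drop m).map PySem.Chars.upperChar := by
  apply List.ext_getElem
  · simp; omega
  · intro i h1 h2
    simp only [List.getElem_map, List.getElem_range]
    by_cases hi : i < m
    · rw [List.getElem_append_left (by simp; omega)]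
      simp [hi, List.getD_eq_getElem?_getD, List.getElem?_eq_getElem (by simpa using h1)]
    · rw [List.getElem_append_right (by simp; omega)]
      have : m + (i - m) = i := by omega
      simp [hi, List.getD_eq_getElem?_getD, List.getElem?_eq_getElem (by simpa using h1),
        List.getElem_drop, List.length_take, Nat.min_eq_left hm, this]

theorem sillycase_spec : Claim_equal_sillycase := by
  intro string _
  unfold Spec_sillycase sillycase sillycase_alt
  apply String.toList_inj.mp
  have hmid : PySem.Int.floordiv ((PySem.Str.len string : Int) + 1) 2
      = (((string.toList.length + 1) / 2 : Nat) : Int) := by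
    simp [PySem.Int.floordiv, PySem.Str.len, Int.fdiv_eq_ediv]
  simp only [hmid]
  rw [PySem.List.foldl_append_singleton_eq_map]
  simp only [String.toList_append, PySem.Str.toList_lower, PySem.Str.toList_upper,
    PySem.Str.toList_slice, PySem.Chars.slice_eq_listSlice,
    PySem.List.slice_to_natCast, PySem.List.slice_from_natCast,
    PySem.Chars.lower, PySem.Chars.upper, String.toList_ofList]
  exact sillycase_lists string.toList _ (by omega)
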